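-- pv_equiv track=rewrite | github.com/buribae/aoc-2019 | 8/8.2.py | create_layer
-- ===== SOURCE A (Python) =====
-- def create_layer(data, width, height):
--     images = []
--     ptr = 0
--     current_layer = []
--
--     while ptr < len(data):
--         for _ in range(height):
--             current_layer.append(data[ptr:ptr+width])
--             ptr += width
--         images.append(current_layer)
--         current_layer = []
--
--     return images
-- ===== SOURCE B (Python) =====
-- def create_layer(data, width, height):
--     if not data:
--         return []
--     n_layers = -(-len(data) // (width * height))
--     rows = [data[r * width : (r + 1) * width] for r in range(height * n_layers)]
--     return [rows[j : j + height] for j in range(0, len(rows), height)]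
-- ===== Notes on version B (the rewrite author's own statement) =====
-- stated objective: alternative
-- what changed: B works in stages instead of A's single mutable pointer threaded through a while loop: it first computes the layer count by closed-form ceiling division, then builds one flat intermediate list of all rows, and finally groups that row list into layers by slicing it in steps of height.
import Mathlib
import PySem

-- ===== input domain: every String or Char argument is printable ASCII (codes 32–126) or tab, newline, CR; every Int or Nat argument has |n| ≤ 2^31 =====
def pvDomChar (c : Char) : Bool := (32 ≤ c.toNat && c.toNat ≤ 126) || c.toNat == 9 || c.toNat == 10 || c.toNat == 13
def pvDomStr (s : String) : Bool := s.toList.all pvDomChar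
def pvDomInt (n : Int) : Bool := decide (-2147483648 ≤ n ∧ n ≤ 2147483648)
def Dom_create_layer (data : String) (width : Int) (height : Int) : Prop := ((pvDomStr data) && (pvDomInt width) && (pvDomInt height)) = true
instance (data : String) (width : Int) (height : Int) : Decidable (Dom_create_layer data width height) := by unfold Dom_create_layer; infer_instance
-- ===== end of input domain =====

-- B builds the result in stages (closed-form ceiling division for the layer count, one flat
-- pass building every row, then a grouping pass slicing the row list into layers) instead of
-- A's single mutable pointer threaded through a while loop: alternative.


-- ===== PORT A =====
-- A's while loop, fuel-bounded: fuel = len(data)+1 suffices on Pre_ (ptr advances by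
-- width*height ≥ 1 per iteration); the fuel-0 branch is unreachable on Pre_.
def createLayerLoop (data : String) (width : Int) (height : Int) :
    Nat → Int → List (List String) → List (List String)
  | 0, _, images => images
  | fuel + 1, ptr, images =>
    if ptr < PySem.Str.len data then
      -- for _ in range(height): current_layer.append(data[ptr:ptr+width]); ptr += width
      let st := (PySem.List.pyRange 0 height 1).foldl
        (fun (st : List String × Int) _ =>
          (st.1 ++ [PySem.Str.slice data (some st.2) (some (st.2 + width))], st.2 + width))
        ([], ptr)
      createLayerLoop data width height fuel st.2 (images ++ [st.1])
    else images

def create_layer (data : String) (width : Int) (height : Int) : List (List String) :=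
  createLayerLoop data width height (data.toList.length + 1) 0 []

-- ===== PORT B =====
-- n_layers = -(-len(data) // (width*height)); rows = [data[r*width:(r+1)*width] for r in
-- range(height*n_layers)]; [rows[j:j+height] for j in range(0, len(rows), height)]
def create_layer_alt (data : String) (width : Int) (height : Int) : List (List String) :=
  if data = "" then []
  else
    let n_layers := -(PySem.Int.floordiv (-(PySem.Str.len data)) (width * height))
    let rows := (PySem.List.pyRange 0 (height * n_layers) 1).map
      (fun r => PySem.Str.slice data (some (r * width)) (some ((r + 1) * width)))
    (PySem.List.pyRange 0 (Int.ofNat rows.length) height).map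
      (fun j => PySem.List.slice rows (some j) (some (j + height)))

-- ===== PRECONDITION & SPEC =====
-- Pre_ excludes nonempty data with width ≤ 0 or height ≤ 0: there A's pointer never reaches
-- len(data), so the while loop never terminates and A returns nothing.
def Pre_create_layer (data : String) (width : Int) (height : Int) : Prop :=
  data = "" ∨ (1 ≤ width ∧ 1 ≤ height)
instance (data : String) (width : Int) (height : Int) : Decidable (Pre_create_layer data width height) := by unfold Pre_create_layer; infer_instance

def pvWitness_create_layer : String × Int × Int := ("123456", 3, 2)

def Spec_create_layer (data : String) (width : Int) (height : Int) (out : List (List String)) : Prop := out = create_layer_alt data width height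
instance (data : String) (width : Int) (height : Int) (out : List (List String)) : Decidable (Spec_create_layer data width height out) := by unfold Spec_create_layer; infer_instance

-- ===== CLAIM (what is proved, stated in full; the proofs are below) =====
def Claim_equal_create_layer : Prop := ∀ (data : String) (width : Int) (height : Int), Dom_create_layer data width height → Pre_create_layer data width height → Spec_create_layer data width height (create_layer data width height)

-- ===== LEMMAS AND PROOFS =====

-- pyRange with a positive step is empty once the start passed the stop.
lemma pyRange_pos_nil (a b s : Int) (hs : 0 < s) (hab : b ≤ a) :
    PySem.List.pyRange a b s = [] := by
  rw [PySem.List.pyRange_of_pos a b hs]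
  simp [show ¬ a < b by omega]

-- pyRange with a positive step peels its first element.
lemma pyRange_pos_cons (a b s : Int) (hs : 0 < s) (hab : a < b) :
    PySem.List.pyRange a b s = a :: PySem.List.pyRange (a + s) b s := by
  rw [PySem.List.pyRange_of_pos a b hs, PySem.List.pyRange_of_pos (a + s) b hs]
  by_cases h2 : a + s < b
  · have hdiv : (b - a + s - 1) / s = (b - (a + s) + s - 1) / s + 1 := by
      have : b - a + s - 1 = (b - (a + s) + s - 1) + 1 * s := by ring
      rw [this, Int.add_mul_ediv_right _ _ (by omega)]
    have hnn : 0 ≤ (b - (a + s) + s - 1) / s := Int.ediv_nonneg (by omega) (by omega)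
    rw [if_pos hab, if_pos h2, hdiv,
        show ((b - (a + s) + s - 1) / s + 1).toNat = ((b - (a + s) + s - 1) / s).toNat + 1 by omega,
        List.range_succ_eq_map]
    simp only [List.map_cons, List.map_map]
    congr 1
    · simp
    · exact List.map_congr_left (fun k _ => by simp [Function.comp]; ring)
  · have hdiv : (b - a + s - 1) / s = 1 := by
      rw [show b - a + s - 1 = (b - a - 1) + 1 * s by ring,
          Int.add_mul_ediv_right _ _ (by omega : s ≠ 0),
          Int.ediv_eq_zero_of_lt (by omega) (by omega)]
      norm_num
    rw [if_pos hab, if_neg h2, hdiv]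
    simp

-- The inner `for` loop of A: appending height rows while advancing the pointer equals a map
-- of row slices at computed offsets, and leaves the pointer at p + n*width.
lemma inner_fold (data : String) (width : Int) :
    ∀ (n : Nat) (acc : List String) (p : Int),
      (List.range n).foldl
        (fun (st : List String × Int) (_ : Nat) =>
          (st.1 ++ [PySem.Str.slice data (some st.2) (some (st.2 + width))], st.2 + width))
        (acc, p)
      = (acc ++ (List.range n).map (fun (k : Nat) =>
            PySem.Str.slice data (some (p + (k : Int) * width)) (some (p + (k : Int) * width + width))),
         p + n * width) := by
  intro n
  induction n with
  | zero => intro acc p; simp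
  | succ m ih =>
    intro acc p
    rw [List.range_succ, List.foldl_append, ih acc p]
    simp only [List.foldl_cons, List.foldl_nil, List.map_append, List.map_cons, List.map_nil,
      List.append_assoc, Prod.mk.injEq]
    exact ⟨trivial, by push_cast; ring⟩

-- A's foldl over pyRange 0 height 1 (elements unused) is the same fold over List.range.
lemma fold_pyRange_eq_range (data : String) (width height : Int) (acc : List String) (p : Int) :
    (PySem.List.pyRange 0 height 1).foldl
      (fun (st : List String × Int) (_ : Int) =>
        (st.1 ++ [PySem.Str.slice data (some st.2) (some (st.2 + width))], st.2 + width))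
      (acc, p)
    = (List.range height.toNat).foldl
      (fun (st : List String × Int) (_ : Nat) =>
        (st.1 ++ [PySem.Str.slice data (some st.2) (some (st.2 + width))], st.2 + width))
      (acc, p) := by
  rw [PySem.List.pyRange_one, List.foldl_map]
  norm_num

-- The inner map over pyRange 0 height 1 written over List.range.
lemma inner_map_eq (data : String) (width height : Int) (start : Int) :
    (PySem.List.pyRange 0 height 1).map (fun r =>
        PySem.Str.slice data (some (start + r * width)) (some (start + r * width + width)))
    = (List.range height.toNat).map (fun (k : Nat) =>
        PySem.Str.slice data (some (start + (k : Int) * width)) (some (start + (k : Int) * width + width))) := by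
  rw [PySem.List.pyRange_one, List.map_map]
  simp only [Int.sub_zero]
  exact List.map_congr_left (fun k _ => by simp [Function.comp])

-- Loop invariant for A: with enough fuel the while loop produces the pending images followed
-- by per-layer chunks (layer starts in steps of width*height) from the current pointer onward.
lemma loop_eq (data : String) (width height : Int) (hw : 1 ≤ width) (hh : 1 ≤ height) :
    ∀ (fuel : Nat) (ptr : Int) (images : List (List String)),
      PySem.Str.len data ≤ ptr + fuel →
      createLayerLoop data width height fuel ptr images
        = images ++ (PySem.List.pyRange ptr (PySem.Str.len data) (width * height)).map
            (fun start => (PySem.List.pyRange 0 height 1).map (fun r =>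
              PySem.Str.slice data (some (start + r * width)) (some (start + r * width + width)))) := by
  have hls : 0 < width * height := by positivity
  intro fuel
  induction fuel with
  | zero =>
    intro ptr images hf
    rw [createLayerLoop, pyRange_pos_nil _ _ _ hls (by simpa using hf)]
    simp
  | succ m ih =>
    intro ptr images hf
    have hcast : ((height.toNat : Int)) = height := Int.toNat_of_nonneg (by omega)
    rw [createLayerLoop]
    by_cases hlt : ptr < PySem.Str.len data
    · rw [if_pos hlt]
      simp only [fold_pyRange_eq_range, inner_fold]
      rw [ih (ptr + ↑height.toNat * width) _ (by
            rw [hcast]; push_cast at hf ⊢; nlinarith),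
          pyRange_pos_cons ptr _ _ hls hlt, hcast,
          show ptr + height * width = ptr + width * height by ring,
          List.map_cons, inner_map_eq]
      simp
    · rw [if_neg hlt, pyRange_pos_nil _ _ _ hls (by omega)]
      simp

-- Slicing h consecutive entries out of a map over List.range, entirely inside the list.
lemma map_range_drop_take {α : Type} (g : Nat → α) (N a h : Nat) (hle : a + h ≤ N) :
    ((((List.range N).map g).drop a).take h) = (List.range h).map (fun k => g (a + k)) := by
  apply List.ext_getElem
  · simp; omega
  · intro i h1 h2
    simp only [List.getElem_take, List.getElem_drop, List.getElem_map, List.getElem_range]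

-- Ceiling division -((-L) // WH) is at least 1 for positive L, and counts pyRange steps.
lemma ceil_pos (L WH : Int) (hpos : 0 < WH) (hL : 0 < L) :
    1 ≤ -(PySem.Int.floordiv (-L) WH) := by
  obtain ⟨h1, h2⟩ := (PySem.Int.neg_floordiv_neg_eq_iff_of_pos (a := L) (q := -(PySem.Int.floordiv (-L) WH)) hpos).mp rfl
  by_contra hc
  have hq : -(PySem.Int.floordiv (-L) WH) ≤ 0 := by omega
  have : -(PySem.Int.floordiv (-L) WH) * WH ≤ 0 := mul_nonpos_of_nonpos_of_nonneg hq (by omega)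
  omega

lemma ceil_count (L WH : Int) (hpos : 0 < WH) :
    (L - 0 + WH - 1) / WH = -(PySem.Int.floordiv (-L) WH) := by
  obtain ⟨h1, h2⟩ := (PySem.Int.neg_floordiv_neg_eq_iff_of_pos (a := L) (q := -(PySem.Int.floordiv (-L) WH)) hpos).mp rfl
  have e1 : (-(PySem.Int.floordiv (-L) WH) - 1) * WH
      = -(PySem.Int.floordiv (-L) WH) * WH - WH := by ring
  have e2 : (-(PySem.Int.floordiv (-L) WH) + 1) * WH
      = -(PySem.Int.floordiv (-L) WH) * WH + WH := by ring
  rw [← PySem.Int.floordiv_eq_ediv_of_pos hpos, PySem.Int.floordiv_eq_iff_of_pos hpos]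
  constructor
  · omega
  · omega

-- B equals the same per-layer chunk formula that A's loop unfolds to.
lemma alt_eq_formula (data : String) (width height : Int)
    (hw : 1 ≤ width) (hh : 1 ≤ height) (hne : data ≠ "") :
    create_layer_alt data width height
      = (PySem.List.pyRange 0 (PySem.Str.len data) (width * height)).map
          (fun start => (PySem.List.pyRange 0 height 1).map (fun r =>
            PySem.Str.slice data (some (start + r * width)) (some (start + r * width + width)))) := by
  lift width to ℕ using (by omega) with W
  lift height to ℕ using (by omega) with H
  have hW : 1 ≤ W := by exact_mod_cast hw
  have hH : 1 ≤ H := by exact_mod_cast hh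
  have hwh : (0 : Int) < (W : Int) * (H : Int) := by positivity
  have hLpos : 0 < PySem.Str.len data := by
    have h0 : data.toList ≠ [] := fun h => hne (String.toList_injective (by simp [h]))
    have h1 : data.toList.length ≠ 0 := by simpa using h0
    have h2 : data.toList.length = data.length := by simp [String.length_toList]
    simp only [PySem.Str.len_eq]
    omega
  obtain ⟨Tn, hTn⟩ :
      ∃ n : ℕ, -(PySem.Int.floordiv (-(PySem.Str.len data)) ((W : Int) * (H : Int))) = (n : Int) :=
    ⟨_, (Int.toNat_of_nonneg (by
      have := ceil_pos (PySem.Str.len data) _ hwh hLpos; omega)).symm⟩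
  have hT1 : 1 ≤ Tn := by
    have := ceil_pos (PySem.Str.len data) _ hwh hLpos
    rw [hTn] at this
    exact_mod_cast this
  simp only [create_layer_alt, if_neg hne, hTn]
  -- the row list, as a map over List.range
  have hrows :
      (PySem.List.pyRange 0 ((H : Int) * (Tn : Int)) 1).map
          (fun r => PySem.Str.slice data (some (r * (W : Int))) (some ((r + 1) * (W : Int))))
        = (List.range (H * Tn)).map
            (fun (k : ℕ) => PySem.Str.slice data (some ((k : Int) * (W : Int)))
              (some (((k : Int) + 1) * (W : Int)))) := by
    rw [show (H : Int) * (Tn : Int) = ((H * Tn : ℕ) : Int) by push_cast; ring,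
      PySem.List.pyRange_one,
      show ((((H * Tn : ℕ) : Int)) - 0).toNat = H * Tn by omega, List.map_map]
    exact List.map_congr_left (fun k _ => by simp [Function.comp])
  rw [hrows, List.length_map, List.length_range]
  -- the grouping pyRange: starts 0, H, …, (Tn-1)·H
  have hgroups : PySem.List.pyRange 0 (Int.ofNat (H * Tn)) (H : Int)
      = (List.range Tn).map (fun (t : ℕ) => (H : Int) * (t : Int)) := by
    rw [PySem.List.pyRange_of_pos 0 (Int.ofNat (H * Tn)) (by exact_mod_cast hH)]
    have hNpos : (0 : Int) < Int.ofNat (H * Tn) := by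
      have h3 : 1 ≤ H * Tn := Nat.one_le_iff_ne_zero.mpr (by positivity)
      simp only [Int.ofNat_eq_natCast]
      exact_mod_cast h3
    have hcount : ((Int.ofNat (H * Tn) - 0 + (H : Int) - 1) / (H : Int)).toNat = Tn := by
      have he : Int.ofNat (H * Tn) - 0 + (H : Int) - 1
          = ((H : Int) - 1) + (Tn : Int) * (H : Int) := by
        push_cast [Int.ofNat_eq_natCast]; ring
      rw [he, Int.add_mul_ediv_right _ _ (by omega : (H : Int) ≠ 0),
        Int.ediv_eq_zero_of_lt (by omega) (by omega)]
      omega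
    rw [if_pos hNpos, hcount]
    exact List.map_congr_left (fun t _ => by omega)
  rw [hgroups]
  -- the formula's layer starts: 0, W·H, …, (Tn-1)·W·H
  have hstarts : PySem.List.pyRange 0 (PySem.Str.len data) ((W : Int) * (H : Int))
      = (List.range Tn).map (fun (t : ℕ) => (W : Int) * (H : Int) * (t : Int)) := by
    rw [PySem.List.pyRange_of_pos 0 (PySem.Str.len data) hwh]
    have hcount : ((PySem.Str.len data - 0 + (W : Int) * (H : Int) - 1)
        / ((W : Int) * (H : Int))).toNat = Tn := by
      rw [ceil_count (PySem.Str.len data) _ hwh, hTn]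
      omega
    rw [if_pos hLpos, hcount]
    exact List.map_congr_left (fun t _ => by omega)
  rw [hstarts, List.map_map, List.map_map]
  refine List.map_congr_left (fun t ht => ?_)
  have htlt : t < Tn := List.mem_range.mp ht
  simp only [Function.comp]
  -- the t-th slice of the row list is the t-th layer of the formula
  rw [show (H : Int) * (t : Int) = ((H * t : ℕ) : Int) by push_cast; ring,
    show ((H * t : ℕ) : Int) + (H : Int) = ((H * t + H : ℕ) : Int) by push_cast; ring,
    PySem.List.slice_natCast,
    show H * t + H - H * t = H by omega,
    map_range_drop_take _ (H * Tn) (H * t) H (by nlinarith),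
    inner_map_eq, Int.toNat_natCast]
  exact List.map_congr_left (fun k _ => by
    congr 2 <;> (push_cast; ring))

-- ===== VERDICT (by name: the statement is the Claim_ definition above) =====
theorem create_layer_spec : Claim_equal_create_layer := by
  intro data width height _ hpre
  unfold Spec_create_layer
  rcases hpre with hempty | ⟨hw, hh⟩
  · subst hempty
    simp [create_layer, create_layer_alt, createLayerLoop, PySem.Str.len_eq]
  · by_cases hne : data = ""
    · subst hne
      simp [create_layer, create_layer_alt, createLayerLoop, PySem.Str.len_eq]
    · rw [create_layer,
        loop_eq data width height hw hh (data.toList.length + 1) 0 []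
          (by simp only [PySem.Str.len_eq, String.length_toList]; push_cast; omega),
        alt_eq_formula data width height hw hh hne]
      simp
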